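-- pv_equiv track=rewrite | github.com/MatthewFrewin/Python-Challenges | Levels 1 to 5/Level 3.1.py | cellular_automaton_processor
-- ===== SOURCE A (Python) =====
-- from copy import deepcopy
--
-- Empty = 0
--
-- Wall = 1
--
-- def cellular_automaton_processor(noise_grid, number_iterations):
--     # Note: Check the following YouTube video to get an intro to cellular automaton: https://www.youtube.com/watch?v=slTEz6555Ts
--     grid_height, grid_width = len(noise_grid), len(noise_grid[0])
--
--     for i in range(number_iterations):
--         temp_grid = deepcopy(noise_grid)
--
--         for y in range(grid_height):
--             for x in range(grid_width):
--                 # Count the number of wall tiles in the neighbourhood of the current tile (Moore Neighborhood)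
--                 wall_count = 0
--                 moore_range = [-1,0,1]
--                 for j in moore_range:
--                     for k in moore_range:
--                         if(j == 0 and k == 0):      # Skip the centre tile
--                             continue
--                         nx, ny = x + k, y + j
--
--                         if 0 <= ny < grid_height and 0 <= nx < grid_width:
--                             # Check if the tile is a Wall
--                             if temp_grid[ny][nx] == Wall:
--                                 wall_count += 1
--                         else:
--                             wall_count += 1
--
--                 noise_grid[y][x] = Wall if wall_count > 4 else Empty
--
--     return noise_grid
-- ===== SOURCE B (Python) =====
-- # B: integral-image smoothing -- each iteration builds a 2D prefix-sum table over the
-- # grid conceptually padded with a one-cell wall border, then reads every 3x3 block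
-- # sum in O(1) and subtracts the centre; no deepcopy and no per-neighbour bounds
-- # checks.  Mutates noise_grid in place like A (equivalence is about the return value).
-- def cellular_automaton_processor(noise_grid, number_iterations):
--     grid_height, grid_width = len(noise_grid), len(noise_grid[0])
--     for _ in range(number_iterations):
--         # P[i][j] = number of walls among padded[u][v] for u < i, v < j,
--         # where padded is the (h+2) x (w+2) grid with an all-wall border.
--         P = [[0] * (grid_width + 3)]
--         for i in range(grid_height + 2):
--             row = noise_grid[i - 1] if 1 <= i <= grid_height else None
--             prev = P[-1]
--             new = [0]
--             rowsum = 0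
--             for j in range(grid_width + 2):
--                 if row is not None and 1 <= j <= grid_width:
--                     rowsum += 1 if row[j - 1] == 1 else 0
--                 else:
--                     rowsum += 1
--                 new.append(prev[j + 1] + rowsum)
--             P.append(new)
--         for y in range(grid_height):
--             row = noise_grid[y]
--             ptop, pbot = P[y], P[y + 3]
--             for x in range(grid_width):
--                 s = pbot[x + 3] - ptop[x + 3] - pbot[x] + ptop[x]
--                 count = s - (1 if row[x] == 1 else 0)
--                 row[x] = 1 if count > 4 else 0
--     return noise_grid
-- ===== Notes on version B (the rewrite author's own statement) =====
-- stated objective: alternative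
-- what changed: B replaces A's per-cell 3x3 neighbour scan with per-neighbour bounds checks and a deepcopy per iteration by a two-stage pass: it builds a 2D prefix-sum (integral image) over the grid padded with a one-cell wall border, then computes each cell's neighbour count as one 3x3 block lookup minus the centre.
import Mathlib
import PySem

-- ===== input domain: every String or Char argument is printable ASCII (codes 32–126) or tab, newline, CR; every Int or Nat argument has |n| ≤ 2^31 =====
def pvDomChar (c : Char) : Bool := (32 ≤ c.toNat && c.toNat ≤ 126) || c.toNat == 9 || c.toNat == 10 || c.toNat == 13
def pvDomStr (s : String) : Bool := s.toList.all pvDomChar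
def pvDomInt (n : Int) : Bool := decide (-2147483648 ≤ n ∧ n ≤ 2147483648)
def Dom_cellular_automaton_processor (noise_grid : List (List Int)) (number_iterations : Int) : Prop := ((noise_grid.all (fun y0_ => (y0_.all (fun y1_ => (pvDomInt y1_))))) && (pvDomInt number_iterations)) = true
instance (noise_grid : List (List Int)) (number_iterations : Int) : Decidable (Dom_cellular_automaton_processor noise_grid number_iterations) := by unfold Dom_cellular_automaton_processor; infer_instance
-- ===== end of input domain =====

-- B smooths each iteration via a 2D prefix-sum (integral image) over the grid padded
-- with a one-cell wall border, reading each 3x3 block in O(1) and subtracting the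
-- centre; equivalence is about the RETURN value (both Pythons also mutate noise_grid
-- in place).

-- ===== PORT A =====
-- body of A's innermost Moore-neighbourhood loop (for k in moore_range: ...)
def pvA_inner (temp : List (List Int)) (h w : Int) (y x j : Int) (wc : Int) (k : Int) : Int :=
  if j = 0 ∧ k = 0 then wc
  else
    let nx := x + k
    let ny := y + j
    if 0 ≤ ny ∧ ny < h ∧ 0 ≤ nx ∧ nx < w then
      if (temp.getD ny.toNat []).getD nx.toNat 0 = 1 then wc + 1 else wc
    else wc + 1

-- wall_count accumulated over moore_range × moore_range
def pvA_count (temp : List (List Int)) (h w : Int) (y x : Int) : Int :=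
  ([-1, 0, 1] : List Int).foldl
    (fun wc j => ([-1, 0, 1] : List Int).foldl (pvA_inner temp h w y x j) wc) 0

-- one iteration: writes into the grid, counting from the frozen deepcopy `g`
def pvA_step (g : List (List Int)) (h w : Int) : List (List Int) :=
  g.mapIdx (fun y row =>
    row.mapIdx (fun x c =>
      if (x : Int) < w then (if pvA_count g h w (y : Int) (x : Int) > 4 then 1 else 0) else c))

def pvA_iter (h w : Int) : Nat → List (List Int) → List (List Int)
  | 0, g => g
  | n + 1, g => pvA_iter h w n (pvA_step g h w)

def cellular_automaton_processor (noise_grid : List (List Int)) (number_iterations : Int) : List (List Int) :=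
  match noise_grid with
  | [] => []  -- Python raises IndexError on len(noise_grid[0]); excluded by Pre_
  | r0 :: _ => pvA_iter (noise_grid.length : Int) (r0.length : Int) number_iterations.toNat noise_grid

-- ===== PORT B =====
-- inner loop body: rowsum += (indicator or 1); new.append(prev[j+1] + rowsum)
def pvB_innerStep (rowOpt : Option (List Int)) (w : Nat) (prev : List Int)
    (st : Int × List Int) (j : Nat) : Int × List Int :=
  let rowsum := st.1 +
    (match rowOpt with
     | some row => if 1 ≤ j ∧ j ≤ w then (if row.getD (j - 1) 0 = 1 then 1 else 0) else 1
     | none => 1)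
  (rowsum, st.2 ++ [prev.getD (j + 1) 0 + rowsum])

-- one pass of the `for j in range(grid_width + 2)` loop building a prefix row
def pvB_buildRow (rowOpt : Option (List Int)) (w : Nat) (prev : List Int) : List Int :=
  ((List.range (w + 2)).foldl (pvB_innerStep rowOpt w prev) (0, [0])).2

-- the `for i in range(grid_height + 2)` loop building the integral image P
def pvB_buildP (g : List (List Int)) (h w : Nat) : List (List Int) :=
  (List.range (h + 2)).foldl
    (fun P i =>
      let rowOpt := if 1 ≤ i ∧ i ≤ h then some (g.getD (i - 1) []) else none
      P ++ [pvB_buildRow rowOpt w (P.getLastD [])])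
    [List.replicate (w + 3) 0]

-- second pass: 3x3 block sum from the table minus the centre
def pvB_step (g : List (List Int)) (h w : Nat) : List (List Int) :=
  let P := pvB_buildP g h w
  g.mapIdx (fun y row =>
    let ptop := P.getD y []
    let pbot := P.getD (y + 3) []
    row.mapIdx (fun x c =>
      if x < w then
        let s := pbot.getD (x + 3) 0 - ptop.getD (x + 3) 0 - pbot.getD x 0 + ptop.getD x 0
        let count := s - (if c = 1 then 1 else 0)
        (if count > 4 then 1 else 0)
      else c))

def pvB_iter (h w : Nat) : Nat → List (List Int) → List (List Int)
  | 0, g => g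
  | n + 1, g => pvB_iter h w n (pvB_step g h w)

def cellular_automaton_processor_alt (noise_grid : List (List Int)) (number_iterations : Int) : List (List Int) :=
  match noise_grid with
  | [] => []  -- Python raises IndexError on len(noise_grid[0]); excluded by Pre_
  | r0 :: _ => pvB_iter noise_grid.length r0.length number_iterations.toNat noise_grid

-- ===== PRECONDITION & SPEC =====
-- Pre_ excludes exactly the inputs where both Pythons raise IndexError: the empty
-- grid, and (when at least one iteration runs) grids with a row shorter than row 0.
def Pre_cellular_automaton_processor (noise_grid : List (List Int)) (number_iterations : Int) : Prop :=
  noise_grid ≠ [] ∧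
  (1 ≤ number_iterations → ∀ r ∈ noise_grid, (noise_grid.headD []).length ≤ r.length)
instance (noise_grid : List (List Int)) (number_iterations : Int) : Decidable (Pre_cellular_automaton_processor noise_grid number_iterations) := by unfold Pre_cellular_automaton_processor; infer_instance

def pvWitness_cellular_automaton_processor : List (List Int) × Int := ([[1, 0, 1], [0, 1, 0], [1, 0, 1]], 2)

def Spec_cellular_automaton_processor (noise_grid : List (List Int)) (number_iterations : Int) (out : List (List Int)) : Prop := out = cellular_automaton_processor_alt noise_grid number_iterations
instance (noise_grid : List (List Int)) (number_iterations : Int) (out : List (List Int)) : Decidable (Spec_cellular_automaton_processor noise_grid number_iterations out) := by unfold Spec_cellular_automaton_processor; infer_instance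

-- ===== CLAIM (what is proved, stated in full; the proofs are below) =====
def Claim_equal_cellular_automaton_processor : Prop := ∀ (noise_grid : List (List Int)) (number_iterations : Int), Dom_cellular_automaton_processor noise_grid number_iterations → Pre_cellular_automaton_processor noise_grid number_iterations → Spec_cellular_automaton_processor noise_grid number_iterations (cellular_automaton_processor noise_grid number_iterations)

-- ===== LEMMAS AND PROOFS =====

-- the common value of one neighbour's contribution: 1 for an out-of-bounds or wall tile
def pvNb (g : List (List Int)) (h w : Int) (ny nx : Int) : Int :=
  if 0 ≤ ny ∧ ny < h ∧ 0 ≤ nx ∧ nx < w then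
    (if (g.getD ny.toNat []).getD nx.toNat 0 = 1 then 1 else 0)
  else 1

lemma pvA_inner_eq (g : List (List Int)) (h w y x j : Int) (wc k : Int) :
    pvA_inner g h w y x j wc k = wc + (if j = 0 ∧ k = 0 then 0 else pvNb g h w (y + j) (x + k)) := by
  simp only [pvA_inner, pvNb]
  split_ifs <;> omega

lemma pvA_count_eq (g : List (List Int)) (h w y x : Int) :
    pvA_count g h w y x =
      pvNb g h w (y - 1) (x - 1) + pvNb g h w (y - 1) x + pvNb g h w (y - 1) (x + 1) +
      pvNb g h w y (x - 1) + pvNb g h w y (x + 1) +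
      pvNb g h w (y + 1) (x - 1) + pvNb g h w (y + 1) x + pvNb g h w (y + 1) (x + 1) := by
  simp only [pvA_count, List.foldl, pvA_inner_eq]
  norm_num [sub_eq_add_neg]

-- the padded (all-wall-border) indicator cell the integral image sums
def pvPad (g : List (List Int)) (h w : Nat) (u v : Nat) : Int :=
  if 1 ≤ u ∧ u ≤ h ∧ 1 ≤ v ∧ v ≤ w then
    (if (g.getD (u - 1) []).getD (v - 1) 0 = 1 then 1 else 0)
  else 1

-- the mathematical integral image
def pvPref (g : List (List Int)) (h w : Nat) (i j : Nat) : Int :=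
  ∑ u ∈ Finset.range i, ∑ v ∈ Finset.range j, pvPad g h w u v

def pvInc (rowOpt : Option (List Int)) (w : Nat) (j : Nat) : Int :=
  match rowOpt with
  | some row => if 1 ≤ j ∧ j ≤ w then (if row.getD (j - 1) 0 = 1 then 1 else 0) else 1
  | none => 1

lemma innerStep_eq (rowOpt : Option (List Int)) (w : Nat) (prev : List Int)
    (st : Int × List Int) (j : Nat) :
    pvB_innerStep rowOpt w prev st j =
      (st.1 + pvInc rowOpt w j, st.2 ++ [prev.getD (j + 1) 0 + (st.1 + pvInc rowOpt w j)]) := by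
  cases rowOpt <;> rfl

lemma foldl_inner (rowOpt : Option (List Int)) (w : Nat) (prev : List Int) (m : Nat) :
    (List.range m).foldl (pvB_innerStep rowOpt w prev) (0, [0]) =
      (∑ s ∈ Finset.range m, pvInc rowOpt w s,
       0 :: (List.range m).map
         (fun t => prev.getD (t + 1) 0 + ∑ s ∈ Finset.range (t + 1), pvInc rowOpt w s)) := by
  induction m with
  | zero => simp
  | succ m ih =>
    rw [List.range_succ, List.foldl_append, ih]
    simp [List.foldl, innerStep_eq, Finset.sum_range_succ]

lemma buildRow_eq (rowOpt : Option (List Int)) (w : Nat) (prev : List Int) :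
    pvB_buildRow rowOpt w prev =
      0 :: (List.range (w + 2)).map
        (fun t => prev.getD (t + 1) 0 + ∑ s ∈ Finset.range (t + 1), pvInc rowOpt w s) := by
  simp [pvB_buildRow, foldl_inner]

-- the i-th row of the integral image as the fold produces it
def pvRowFn (g : List (List Int)) (h w : Nat) : Nat → List Int
  | 0 => List.replicate (w + 3) 0
  | i + 1 =>
    pvB_buildRow (if 1 ≤ i ∧ i ≤ h then some (g.getD (i - 1) []) else none) w (pvRowFn g h w i)

lemma map_range_getLastD (f : Nat → List Int) (m : Nat) :
    ((List.range (m + 1)).map f).getLastD [] = f m := by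
  rw [List.range_succ, List.map_append]
  simp

lemma buildP_fold (g : List (List Int)) (h w : Nat) (m : Nat) :
    (List.range m).foldl
      (fun P i =>
        let rowOpt := if 1 ≤ i ∧ i ≤ h then some (g.getD (i - 1) []) else none
        P ++ [pvB_buildRow rowOpt w (P.getLastD [])])
      [List.replicate (w + 3) 0] = (List.range (m + 1)).map (pvRowFn g h w) := by
  induction m with
  | zero => simp [pvRowFn]
  | succ m ih =>
    rw [List.range_succ, List.foldl_append, ih]
    simp only [List.foldl]
    rw [map_range_getLastD]
    conv_rhs => rw [List.range_succ, List.map_append]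
    rfl

lemma buildP_eq (g : List (List Int)) (h w : Nat) :
    pvB_buildP g h w = (List.range (h + 3)).map (pvRowFn g h w) := by
  rw [pvB_buildP, buildP_fold]

lemma pvInc_eq_pad (g : List (List Int)) (h w : Nat) (i s : Nat) :
    pvInc (if 1 ≤ i ∧ i ≤ h then some (g.getD (i - 1) []) else none) w s = pvPad g h w i s := by
  unfold pvInc pvPad
  split_ifs <;> simp_all

lemma rowFn_getD (g : List (List Int)) (h w : Nat) :
    ∀ i, ∀ j, j ≤ w + 2 → (pvRowFn g h w i).getD j 0 = pvPref g h w i j := by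
  intro i
  induction i with
  | zero =>
    intro j hj
    simp [pvRowFn, pvPref, List.getD_eq_getElem?_getD, show j < w + 3 by omega]
  | succ i ih =>
    intro j hj
    rw [pvRowFn, buildRow_eq]
    cases j with
    | zero => simp [pvPref]
    | succ t =>
      have ht : t < w + 2 := by omega
      have hmap : ((List.range (w + 2)).map
          (fun t => (pvRowFn g h w i).getD (t + 1) 0 +
            ∑ s ∈ Finset.range (t + 1),
              pvInc (if 1 ≤ i ∧ i ≤ h then some (g.getD (i - 1) []) else none) w s)).getD t 0
          = (pvRowFn g h w i).getD (t + 1) 0 +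
            ∑ s ∈ Finset.range (t + 1),
              pvInc (if 1 ≤ i ∧ i ≤ h then some (g.getD (i - 1) []) else none) w s := by
        simp [List.getD_eq_getElem?_getD, ht]
      rw [List.getD_cons_succ, hmap, ih (t + 1) (by omega)]
      simp only [pvInc_eq_pad]
      rw [show pvPref g h w (i + 1) (t + 1) =
            pvPref g h w i (t + 1) + ∑ s ∈ Finset.range (t + 1), pvPad g h w i s from by
          rw [pvPref,
            Finset.sum_range_succ (fun u => ∑ v ∈ Finset.range (t + 1), pvPad g h w u v) i]
          rfl]

lemma buildP_getD (g : List (List Int)) (h w : Nat) (i j : Nat) (hi : i ≤ h + 2) (hj : j ≤ w + 2) :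
    ((pvB_buildP g h w).getD i []).getD j 0 = pvPref g h w i j := by
  rw [buildP_eq]
  have : ((List.range (h + 3)).map (pvRowFn g h w)).getD i [] = pvRowFn g h w i := by
    simp [List.getD_eq_getElem?_getD, show i < h + 3 by omega]
  rw [this, rowFn_getD g h w i j hj]

lemma pad_eq_nb (g : List (List Int)) (w : Nat) (y x du dv : Nat) :
    pvPad g g.length w (y + du) (x + dv) =
      pvNb g (g.length : Int) (w : Int) ((y : Int) + (du : Int) - 1) ((x : Int) + (dv : Int) - 1) := by
  unfold pvPad pvNb
  have h1 : ((y : Int) + (du : Int) - 1).toNat = y + du - 1 := by omega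
  have h2 : ((x : Int) + (dv : Int) - 1).toNat = x + dv - 1 := by omega
  rw [h1, h2]
  split_ifs <;> first | rfl | omega

lemma step_eq (g : List (List Int)) (w : Nat) :
    pvA_step g (g.length : Int) (w : Int) = pvB_step g g.length w := by
  simp only [pvA_step, pvB_step]
  apply List.ext_getElem
  · simp
  · intro y hy1 hy2
    simp only [List.getElem_mapIdx]
    apply List.ext_getElem
    · simp
    · intro x hx1 hx2
      simp only [List.getElem_mapIdx]
      simp only [List.length_mapIdx] at hy1 hx1 hy2 hx2
      by_cases hxw : x < w
      · have hxw' : (x : Int) < (w : Int) := by exact_mod_cast hxw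
        rw [if_pos hxw', if_pos hxw]
        have hPt := fun (j : Nat) (hj : j ≤ w + 2) =>
          buildP_getD g g.length w y j (by omega) hj
        have hPb := fun (j : Nat) (hj : j ≤ w + 2) =>
          buildP_getD g g.length w (y + 3) j (by omega) hj
        rw [hPt (x + 3) (by omega), hPt x (by omega), hPb (x + 3) (by omega), hPb x (by omega)]
        -- expand the four integral-image corners into the 3×3 block of pads
        have hout : ∀ j, pvPref g g.length w (y + 3) j =
            pvPref g g.length w y j +
            (∑ v ∈ Finset.range j, pvPad g g.length w y v) +
            (∑ v ∈ Finset.range j, pvPad g g.length w (y + 1) v) +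
            (∑ v ∈ Finset.range j, pvPad g g.length w (y + 2) v) := by
          intro j
          have e : ∀ m : Nat, pvPref g g.length w (m + 1) j =
              pvPref g g.length w m j + ∑ v ∈ Finset.range j, pvPad g g.length w m v :=
            fun m => by
              rw [pvPref,
                Finset.sum_range_succ (fun u => ∑ v ∈ Finset.range j, pvPad g g.length w u v) m]
              rfl
          rw [show y + 3 = (y + 2) + 1 from rfl, e (y + 2),
            show y + 2 = (y + 1) + 1 from rfl, e (y + 1), e y]
        have hin : ∀ u, (∑ v ∈ Finset.range (x + 3), pvPad g g.length w u v) =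
            (∑ v ∈ Finset.range x, pvPad g g.length w u v) +
            pvPad g g.length w u x + pvPad g g.length w u (x + 1) + pvPad g g.length w u (x + 2) := by
          intro u
          show (∑ v ∈ Finset.range (x + 2 + 1), pvPad g g.length w u v) = _
          rw [Finset.sum_range_succ, Finset.sum_range_succ, Finset.sum_range_succ]
        -- the centre pad is the indicator of the current cell
        have hcentre : pvPad g g.length w (y + 1) (x + 1) = (if g[y][x] = 1 then 1 else 0) := by
          unfold pvPad
          rw [if_pos (show 1 ≤ y + 1 ∧ y + 1 ≤ g.length ∧ 1 ≤ x + 1 ∧ x + 1 ≤ w by omega)]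
          have h1 : g.getD (y + 1 - 1) [] = g[y] := by
            simp [List.getD_eq_getElem?_getD, hy1]
          have h2 : (g[y]).getD (x + 1 - 1) 0 = g[y][x] := by
            simp [List.getD_eq_getElem?_getD, hx1]
          rw [h1, h2]
        have hcnt : pvA_count g (g.length : Int) (w : Int) (y : Int) (x : Int) =
            pvPref g g.length w (y + 3) (x + 3) - pvPref g g.length w y (x + 3) -
            pvPref g g.length w (y + 3) x + pvPref g g.length w y x -
            (if g[y][x] = 1 then 1 else 0) := by
          rw [pvA_count_eq, hout (x + 3), hout x, hin y, hin (y + 1), hin (y + 2), ← hcentre]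
          have e := fun du dv => pad_eq_nb g w y x du dv
          have e00 := e 0 0; have e01 := e 0 1; have e02 := e 0 2
          have e10 := e 1 0; have e11 := e 1 1; have e12 := e 1 2
          have e20 := e 2 0; have e21 := e 2 1; have e22 := e 2 2
          simp only [Nat.add_zero] at e00 e01 e02 e10 e11 e12 e20 e21 e22
          rw [e00, e01, e02, e10, e11, e12, e20, e21, e22]
          push_cast
          have c1 : ∀ z : Int, z + 0 - 1 = z - 1 := fun z => by ring
          have c2 : ∀ z : Int, z + 1 - 1 = z := fun z => by ring
          have c3 : ∀ z : Int, z + 2 - 1 = z + 1 := fun z => by ring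
          rw [c1, c1, c2, c2, c3, c3]
          ring
        rw [hcnt]
      · rw [if_neg (by exact_mod_cast hxw), if_neg hxw]

lemma step_length (g : List (List Int)) (w : Nat) : (pvB_step g g.length w).length = g.length := by
  simp [pvB_step]

lemma iter_eq (w : Nat) : ∀ (n : Nat) (g : List (List Int)),
    pvA_iter (g.length : Int) (w : Int) n g = pvB_iter g.length w n g := by
  intro n
  induction n with
  | zero => intro g; rfl
  | succ n ih =>
    intro g
    show pvA_iter _ _ n (pvA_step g (g.length : Int) (w : Int)) = pvB_iter _ _ n (pvB_step g g.length w)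
    rw [step_eq g w]
    have hlen := step_length g w
    have := ih (pvB_step g g.length w)
    rw [hlen] at this
    exact this

-- ===== VERDICT (by name: the statement is the Claim_ definition above) =====
theorem cellular_automaton_processor_spec : Claim_equal_cellular_automaton_processor := by
  intro ng ni _ pre
  unfold Spec_cellular_automaton_processor
  match ng, pre with
  | r0 :: rest, ⟨_, _⟩ =>
    unfold cellular_automaton_processor cellular_automaton_processor_alt
    exact iter_eq r0.length ni.toNat (r0 :: rest)
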